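-- pv_equiv track=rewrite | github.com/IsakGrimsson/String_compression | functions_generic.py | is_lyndon_word
-- ===== SOURCE A (Python) =====
-- def is_lyndon_word(s):
--     n = len(s)
--     i = 0
--     j = 1
--     k = 0
--
--     while i < n and j < n and k < n:
--         if s[(j + k) % n] == s[(i + k) % n]:
--             k += 1
--         elif s[(j + k) % n] < s[(i + k) % n]:
--             i = i + k + 1
--             k = 0
--         else:
--             j = j + k + 1
--             k = 0
--
--         if i == j:
--             j = j + 1
--
--     return i == 0
-- ===== SOURCE B (Python) =====
-- def is_lyndon_word(s):
--     n = len(s)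
--     return all(s <= s[i:] + s[:i] for i in range(n))
-- ===== Notes on version B (the rewrite author's own statement) =====
-- stated objective: simpler
-- what changed: Replaced the dual-pointer (Booth-style) least-rotation duel with a direct one-liner checking that s is lexicographically at most every one of its rotations, which is exactly the condition the duel computes.
import Mathlib
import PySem

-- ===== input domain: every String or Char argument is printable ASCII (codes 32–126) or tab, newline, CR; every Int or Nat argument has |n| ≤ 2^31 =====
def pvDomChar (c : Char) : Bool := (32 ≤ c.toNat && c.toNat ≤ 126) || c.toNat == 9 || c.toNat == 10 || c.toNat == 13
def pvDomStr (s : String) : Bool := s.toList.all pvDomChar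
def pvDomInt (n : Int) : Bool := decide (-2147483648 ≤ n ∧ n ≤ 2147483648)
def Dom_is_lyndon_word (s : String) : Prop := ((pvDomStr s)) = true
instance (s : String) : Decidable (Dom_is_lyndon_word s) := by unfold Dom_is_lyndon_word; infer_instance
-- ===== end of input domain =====

-- B replaces A's dual-pointer least-rotation duel by the direct check that s is <= every one of its rotations (simpler; not faster).

-- ===== PORT A =====
-- A's while loop on state (i, j, k); returns the final value of i.
-- Every s[(j+k)%n] / s[(i+k)%n] access has index < n when the body runs, ported as List.getD.
-- The fuel argument only makes the loop structurally recursive: (2n-i)+(2n-j)+(n-k) strictly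
-- decreases each iteration and is ≤ 5n initially, so the fuel 5n+1 passed below is never
-- exhausted (loop_main below carries exactly this fuel bound as a hypothesis).
def lyndonLoop (L : List Char) (n : Nat) : Nat → Nat → Nat → Nat → Nat
  | 0, i, _, _ => i
  | fuel + 1, i, j, k =>
    if i < n ∧ j < n ∧ k < n then
      if L.getD ((j + k) % n) 'a' = L.getD ((i + k) % n) 'a' then
        lyndonLoop L n fuel i (if i = j then j + 1 else j) (k + 1)
      else if L.getD ((j + k) % n) 'a' < L.getD ((i + k) % n) 'a' then
        lyndonLoop L n fuel (i + k + 1) (if i + k + 1 = j then j + 1 else j) 0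
      else
        lyndonLoop L n fuel i (if i = j + k + 1 then j + k + 2 else j + k + 1) 0
    else i

def is_lyndon_word (s : String) : Bool :=
  lyndonLoop s.toList s.toList.length (5 * s.toList.length + 1) 0 1 0 == 0

-- ===== PORT B =====
-- all(s <= s[i:] + s[:i] for i in range(n)); the slices s[i:], s[:i] for 0 ≤ i < n are drop/take,
-- and Python's <= on str is Lean's ≤ on the char lists (code-point lexicographic).
def is_lyndon_word_alt (s : String) : Bool :=
  (List.range s.toList.length).all fun i =>
    decide (s.toList ≤ s.toList.drop i ++ s.toList.take i)

-- ===== PRECONDITION & SPEC =====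
def Spec_is_lyndon_word (s : String) (out : Bool) : Prop := out = is_lyndon_word_alt s
instance (s : String) (out : Bool) : Decidable (Spec_is_lyndon_word s out) := by unfold Spec_is_lyndon_word; infer_instance

-- ===== CLAIM (what is proved, stated in full; the proofs are below) =====
def Claim_equal_is_lyndon_word : Prop := ∀ (s : String), Dom_is_lyndon_word s → Spec_is_lyndon_word s (is_lyndon_word s)

-- ===== LEMMAS AND PROOFS =====

-- rotation of L by p, and the character of L at cyclic position x
def rotC (L : List Char) (p : Nat) : List Char := L.drop p ++ L.take p

def chAt (L : List Char) (x : Nat) : Char := L.getD (x % L.length) 'a'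

theorem rotC_length (L : List Char) (p : Nat) : (rotC L p).length = L.length := by
  simp [rotC]; omega

theorem rotC_zero (L : List Char) : rotC L 0 = L := by simp [rotC]

theorem rotC_getElem (L : List Char) (p m : Nat) (hp : p < L.length) (hm : m < L.length)
    (h : m < (rotC L p).length) :
    (rotC L p)[m] = chAt L (p + m) := by
  have hn : 0 < L.length := by omega
  unfold rotC chAt at *
  rw [List.getElem_append]
  by_cases hc : m < L.length - p
  · have h1 : m < (List.drop p L).length := by simp; omega
    rw [dif_pos h1, List.getElem_drop, List.getD_eq_getElem L 'a' (by exact Nat.mod_lt _ hn)]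
    have : (p + m) % L.length = p + m := Nat.mod_eq_of_lt (by omega)
    simp [this]
  · have h1 : ¬ m < (List.drop p L).length := by simp; omega
    rw [dif_neg h1, List.getElem_take, List.getD_eq_getElem L 'a' (by exact Nat.mod_lt _ hn)]
    have : (p + m) % L.length = p + m - L.length := by
      rw [Nat.mod_eq_sub_mod (by omega), Nat.mod_eq_of_lt (by omega)]
    simp only [this, List.length_drop]
    congr 1
    omega

theorem chAt_mod_add (L : List Char) (x l : Nat) : chAt L (x % L.length + l) = chAt L (x + l) := by
  simp [chAt, Nat.mod_add_mod]

-- "rotation q is not minimal": some rotation is strictly below it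
def NM (L : List Char) (q : Nat) : Prop := ∃ p < L.length, rotC L p < rotC L q

-- the duel step: if the rotations at a and b agree for k steps and the char after b's run is
-- smaller, then each rotation a, a+1, …, a+k is beaten by the corresponding shift of b.
theorem duel (L : List Char) (a b k : Nat) (hk : k < L.length)
    (hpre : ∀ m < k, chAt L (a + m) = chAt L (b + m))
    (hlt : chAt L (b + k) < chAt L (a + k)) :
    ∀ m ≤ k, a + m < L.length → rotC L ((b + m) % L.length) < rotC L (a + m) := by
  intro m hm ha
  have hn : 0 < L.length := by omega
  have hb : (b + m) % L.length < L.length := Nat.mod_lt _ hn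
  rw [List.lt_iff_exists]
  right
  refine ⟨k - m, by rw [rotC_length]; omega, by rw [rotC_length]; omega, ?_, ?_⟩
  · intro l hl
    rw [rotC_getElem L _ l hb (by omega) (by rw [rotC_length]; omega),
        rotC_getElem L _ l ha (by omega) (by rw [rotC_length]; omega),
        chAt_mod_add]
    have h1 : b + m + l = b + (m + l) := by omega
    have h2 : a + m + l = a + (m + l) := by omega
    rw [h1, h2, (hpre (m + l) (by omega)).symm]
  · rw [rotC_getElem L _ _ hb (by omega) (by rw [rotC_length]; omega),
        rotC_getElem L _ _ ha (by omega) (by rw [rotC_length]; omega),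
        chAt_mod_add]
    have h1 : b + m + (k - m) = b + k := by omega
    have h2 : a + m + (k - m) = a + k := by omega
    rw [h1, h2]
    exact hlt

-- a minimizing rotation index exists
theorem exists_min_rot (L : List Char) (h0 : 0 < L.length) :
    ∃ m < L.length, ∀ p < L.length, rotC L m ≤ rotC L p := by
  obtain ⟨m, hm, hmin⟩ := Finset.exists_min_image (Finset.range L.length) (rotC L)
    ⟨0, Finset.mem_range.mpr h0⟩
  exact ⟨m, Finset.mem_range.mp hm, fun p hp => hmin p (Finset.mem_range.mpr hp)⟩

-- at loop exit with i = 0: rotation 0 is minimal.  Either j ran off the end (every other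
-- rotation was eliminated), or k = n (the string has cyclic period j and the minimizer can
-- be walked down below j).
theorem exit_zero (L : List Char) (j k : Nat) (h0 : 0 < L.length) (hj0 : j ≠ 0)
    (hpre : ∀ m < k, chAt L (0 + m) = chAt L (j + m))
    (hc : ∀ p < L.length, p ≠ 0 → p ≠ j → p ≤ max 0 j → NM L p)
    (hexit : L.length ≤ j ∨ L.length ≤ k) :
    ∀ p < L.length, rotC L 0 ≤ rotC L p := by
  obtain ⟨m, hm, hmin⟩ := exists_min_rot L h0
  have hnotNM : ¬ NM L m := by
    rintro ⟨q, hq, hlt⟩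
    exact absurd (hmin q hq) (not_le.mpr hlt)
  have key : rotC L 0 ≤ rotC L m := by
    rcases hexit with hJ | hK
    · rcases eq_or_ne m 0 with rfl | hm0
      · exact le_refl _
      · exact absurd (hc m hm hm0 (by omega) (by omega)) hnotNM
    · by_cases hJ' : L.length ≤ j
      · rcases eq_or_ne m 0 with rfl | hm0
        · exact le_refl _
        · exact absurd (hc m hm hm0 (by omega) (by omega)) hnotNM
      rw [not_le] at hJ'
      -- period fact: chAt (j + x) = chAt x for all x
      have hper : ∀ x : Nat, chAt L (j + x) = chAt L x := by
        intro x
        have h1 : chAt L (j + x % L.length) = chAt L (x % L.length) :=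
          (hpre (x % L.length) (by have := Nat.mod_lt x h0; omega)).symm.trans
            (by rw [Nat.zero_add])
        have h2 : chAt L (j + x % L.length) = chAt L (j + x) := by
          rw [Nat.add_comm j (x % L.length), chAt_mod_add, Nat.add_comm x j]
        have h3 : chAt L (x % L.length) = chAt L x := by
          have := chAt_mod_add L x 0
          simpa using this
        rw [← h2, h1, h3]
      -- hence rotC L p = rotC L (p - j) for j ≤ p < n
      have hrot : ∀ p, j ≤ p → p < L.length → rotC L p = rotC L (p - j) := by
        intro p hjp hp
        apply List.ext_getElem (by rw [rotC_length, rotC_length])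
        intro l hl hl'
        rw [rotC_getElem L p l hp (by rw [rotC_length] at hl; omega) hl,
            rotC_getElem L (p - j) l (by omega) (by rw [rotC_length] at hl; omega) hl']
        have : j + (p - j + l) = p + l := by omega
        rw [← this, hper]
      -- strong induction: any minimizing index can be driven down to 0
      have aux : ∀ m', m' < L.length → (∀ p < L.length, rotC L m' ≤ rotC L p) →
          rotC L 0 ≤ rotC L m' := by
        intro m'
        induction m' using Nat.strong_induction_on with
        | _ m' IH =>
          intro hm' hmin'
          rcases eq_or_ne m' 0 with rfl | h0'
          · exact le_refl _
          rcases Nat.lt_trichotomy m' j with hlt | heq | hgt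
          · exact absurd (hc m' hm' h0' (by omega) (by omega))
              (by rintro ⟨q, hq, hqlt⟩; exact absurd (hmin' q hq) (not_le.mpr hqlt))
          · have : rotC L m' = rotC L 0 := by
              rw [hrot m' (by omega) hm']; congr 1; omega
            rw [this]
          · have heq' : rotC L m' = rotC L (m' - j) := hrot m' (by omega) hm'
            have := IH (m' - j) (by omega) (by omega)
              (fun p hp => heq' ▸ hmin' p hp)
            rw [heq']
            exact this
      exact aux m hm hmin
  exact fun p hp => le_trans key (hmin p hp)

-- the loop invariant: i and j are distinct candidates, the two runs agree for k characters,
-- every other index up to max i j has been eliminated, and i moved away from 0 only if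
-- rotation 0 was eliminated.
def InvL (L : List Char) (n i j k : Nat) : Prop :=
  n = L.length ∧ i ≠ j ∧
  (∀ m < k, chAt L (i + m) = chAt L (j + m)) ∧
  (∀ p < n, p ≠ i → p ≠ j → p ≤ max i j → NM L p) ∧
  (i ≠ 0 → NM L 0)

theorem loop_main (L : List Char) (n : Nat) : ∀ (fuel i j k : Nat), InvL L n i j k →
    (2 * n - i) + (2 * n - j) + (n - k) < fuel →
    ((lyndonLoop L n fuel i j k = 0) ↔ (∀ p < n, rotC L 0 ≤ rotC L p)) := by
  intro fuel
  induction fuel with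
  | zero => intro i j k _ hf; omega
  | succ fuel IH =>
    intro i j k hInv hf
    obtain ⟨hn, hij, hb, hc, hd⟩ := hInv
    subst hn
    rw [lyndonLoop]
    by_cases hcond : i < L.length ∧ j < L.length ∧ k < L.length
    · obtain ⟨hi, hj, hk⟩ := hcond
      have h0 : 0 < L.length := by omega
      rw [if_pos ⟨hi, hj, hk⟩]
      by_cases heq : L.getD ((j + k) % L.length) 'a' = L.getD ((i + k) % L.length) 'a'
      · -- equal characters: extend the common prefix
        rw [if_pos heq, if_neg hij]
        apply IH i j (k + 1) ?_ (by omega)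
        refine ⟨rfl, hij, ?_, hc, hd⟩
        intro m hm
        rcases Nat.lt_or_ge m k with h' | h'
        · exact hb m h'
        · have : m = k := by omega
          subst this
          exact heq.symm
      · rw [if_neg heq]
        by_cases hlt : L.getD ((j + k) % L.length) 'a' < L.getD ((i + k) % L.length) 'a'
        · -- s[(j+k)%n] < s[(i+k)%n] : i loses, i := i+k+1
          rw [if_pos hlt]
          apply IH (i + k + 1) (if i + k + 1 = j then j + 1 else j) 0 ?_
            (by split <;> omega)
          have hduel := duel L i j k hk hb hlt
          have hNM : ∀ p, i ≤ p → p ≤ i + k → p < L.length → NM L p := by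
            intro p h1 h2 hp
            have := hduel (p - i) (by omega) (by omega)
            rw [show i + (p - i) = p by omega] at this
            exact ⟨(j + (p - i)) % L.length, Nat.mod_lt _ h0, this⟩
          refine ⟨rfl, ?_, by omega, ?_, ?_⟩
          · split <;> omega
          · intro p hp hpi hpj hple
            by_cases hin : i ≤ p ∧ p ≤ i + k
            · exact hNM p hin.1 hin.2 hp
            · apply hc p hp (by omega) ?_ ?_
              · intro hpj'
                subst hpj'
                revert hpi hpj
                split <;> omega
              · revert hpi hpj hple
                split <;> (intro hpi hpj hple; omega)
          · intro _
            rcases eq_or_ne i 0 with rfl | hi0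
            · exact hNM 0 (by omega) (by omega) h0
            · exact hd hi0
        · -- s[(j+k)%n] > s[(i+k)%n] : j loses, j := j+k+1
          rw [if_neg hlt]
          apply IH i (if i = j + k + 1 then j + k + 2 else j + k + 1) 0 ?_
            (by split <;> omega)
          have hlt' : chAt L (i + k) < chAt L (j + k) := by
            rcases lt_trichotomy (L.getD ((j + k) % L.length) 'a')
                (L.getD ((i + k) % L.length) 'a') with h' | h' | h'
            · exact absurd h' hlt
            · exact absurd h' heq
            · exact h'
          have hduel := duel L j i k hk (fun m hm => (hb m hm).symm) hlt'
          have hNM : ∀ p, j ≤ p → p ≤ j + k → p < L.length → NM L p := by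
            intro p h1 h2 hp
            have := hduel (p - j) (by omega) (by omega)
            rw [show j + (p - j) = p by omega] at this
            exact ⟨(i + (p - j)) % L.length, Nat.mod_lt _ h0, this⟩
          refine ⟨rfl, ?_, by omega, ?_, hd⟩
          · split <;> omega
          · intro p hp hpi hpj hple
            by_cases hin : j ≤ p ∧ p ≤ j + k
            · exact hNM p hin.1 hin.2 hp
            · apply hc p hp hpi ?_ ?_
              · omega
              · revert hpj hple
                split <;> (intro hpj hple; omega)
    · -- loop exit
      rw [if_neg hcond]
      constructor
      · rintro rfl
        rcases Nat.eq_zero_or_pos L.length with hL | hL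
        · intro p hp; omega
        · exact exit_zero L j k hL (Ne.symm hij) hb hc (by omega)
      · intro hall
        by_contra hi0
        obtain ⟨q, hq, hqlt⟩ := hd hi0
        exact absurd (hall q hq) (not_le.mpr hqlt)

theorem final_eq (s : String) : is_lyndon_word s = is_lyndon_word_alt s := by
  unfold is_lyndon_word is_lyndon_word_alt
  have hiff : (lyndonLoop s.toList s.toList.length (5 * s.toList.length + 1) 0 1 0 = 0) ↔
      (∀ p < s.toList.length, rotC s.toList 0 ≤ rotC s.toList p) := by
    rcases Nat.lt_or_ge s.toList.length 2 with hL | hL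
    · -- n ≤ 1: the loop exits at once (j = 1 is out of range) and both sides are trivially true
      rw [lyndonLoop, if_neg (by omega)]
      constructor
      · intro _ p hp
        have : p = 0 := by omega
        subst this
        exact le_refl _
      · intro _
        rfl
    · exact loop_main s.toList s.toList.length (5 * s.toList.length + 1) 0 1 0
        ⟨rfl, by omega, fun m hm => absurd hm (by omega),
         fun p hp h0 h1 hle => absurd hle (by omega),
         fun h => absurd rfl h⟩ (by omega)
  rw [Bool.eq_iff_iff]
  simp only [beq_iff_eq, List.all_eq_true, List.mem_range, decide_eq_true_eq]
  rw [hiff]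
  constructor
  · intro h i hi
    have := h i hi
    rwa [rotC_zero] at this
  · intro h p hp
    rw [rotC_zero]
    exact h p hp

-- ===== VERDICT (by name: the statement is the Claim_ definition above) =====
theorem is_lyndon_word_spec : Claim_equal_is_lyndon_word := by
  intro s _
  unfold Spec_is_lyndon_word
  exact final_eq s
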